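-- pv_equiv track=rewrite | github.com/gayunlee/cs-agent-demo | scripts/build_ambiguous_catalog.py | extract_first_user_and_manager
-- ===== SOURCE A (Python) =====
-- def extract_first_user_and_manager(turns: list[dict]) -> tuple[str | None, str | None]:
--     """turns 리스트에서 (유저 첫 발화, 그 이후 매니저 첫 발화) 반환."""
--     first_user: str | None = None
--     first_manager: str | None = None
--     user_seen = False
--     for t in turns:
--         role = t.get("role", "")
--         text = (t.get("text") or "").strip()
--         if not text:
--             continue
--         # bot 자동 응답은 skip (첫 인사 등)
--         if role == "bot":
--             continue
--         if role == "user":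
--             if not user_seen:
--                 first_user = text
--                 user_seen = True
--             continue
--         if role == "manager":
--             if user_seen and first_manager is None:
--                 first_manager = text
--                 break
--     return first_user, first_manager
-- ===== SOURCE B (Python) =====
-- def extract_first_user_and_manager(turns: list[dict]) -> tuple[str | None, str | None]:
--     """turns 리스트에서 (유저 첫 발화, 그 이후 매니저 첫 발화) 반환."""
--     def clean(t):
--         return t.get("role", ""), (t.get("text") or "").strip()
--     # stage 1: locate the first non-empty user utterance
--     idx = None
--     first_user = None
--     for i, t in enumerate(turns):
--         role, text = clean(t)
--         if role == "user" and text: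
--             idx, first_user = i, text
--             break
--     if idx is None:
--         return None, None
--     # stage 2: first non-empty manager utterance strictly after it
--     first_manager = next(
--         (text for role, text in map(clean, turns[idx + 1:]) if role == "manager" and text),
--         None,
--     )
--     return first_user, first_manager
-- ===== Notes on version B (the rewrite author's own statement) =====
-- stated objective: simpler
-- what changed: Replaced the single-pass flag-based state machine (user_seen/first_manager flags with continue/break) by a find-then-search-after decomposition: first locate the first non-empty user utterance, then search only the suffix after it for the first non-empty manager utterance.
import Mathlib
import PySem

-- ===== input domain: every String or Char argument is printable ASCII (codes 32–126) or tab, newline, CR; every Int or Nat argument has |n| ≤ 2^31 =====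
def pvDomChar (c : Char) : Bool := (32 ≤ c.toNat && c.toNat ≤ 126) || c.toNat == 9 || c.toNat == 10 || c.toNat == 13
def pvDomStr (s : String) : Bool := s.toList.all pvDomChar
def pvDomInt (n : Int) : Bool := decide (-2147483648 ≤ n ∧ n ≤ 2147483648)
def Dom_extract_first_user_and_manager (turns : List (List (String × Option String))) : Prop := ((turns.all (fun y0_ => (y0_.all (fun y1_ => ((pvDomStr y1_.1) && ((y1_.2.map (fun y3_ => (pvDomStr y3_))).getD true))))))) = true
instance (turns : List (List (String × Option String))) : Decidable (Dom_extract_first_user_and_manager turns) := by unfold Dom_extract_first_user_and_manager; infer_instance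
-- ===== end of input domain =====

-- B replaces A's one-pass flag state machine by a find-then-search-after decomposition (same cost); return value only.

-- ===== PORT A =====
-- t.get(k) on the association-list dict: first match
def pvDget (t : List (String × Option String)) (k : String) : Option (Option String) :=
  (t.find? (fun p => p.1 == k)).map (·.2)

-- the for-loop with its (first_user, first_manager, user_seen) state; the 'break' returns immediately
def pvALoop : List (List (String × Option String)) → Option String → Option String → Bool → Option String × Option String
  | [], fu, fm, _ => (fu, fm)
  | t :: rest, fu, fm, seen =>
    let role : Option String := (pvDget t "role").getD (some "")
    let text := PySem.Str.strip (((pvDget t "text").getD none).getD "")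
    if text = "" then pvALoop rest fu fm seen
    else if role = some "bot" then pvALoop rest fu fm seen
    else if role = some "user" then
      (if seen then pvALoop rest fu fm seen else pvALoop rest (some text) fm true)
    else if role = some "manager" then
      (if seen = true ∧ fm = none then (fu, some text) else pvALoop rest fu fm seen)
    else pvALoop rest fu fm seen

def extract_first_user_and_manager (turns : List (List (String × Option String))) : Option String × Option String :=
  pvALoop turns none none false

-- ===== PORT B =====
-- clean(t) = (role, stripped text)
def pvClean (t : List (String × Option String)) : Option String × String :=
  ((pvDget t "role").getD (some ""), PySem.Str.strip (((pvDget t "text").getD none).getD ""))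

-- stage 1: first non-empty user utterance, together with the suffix after it (turns[idx+1:])
def pvFindUser : List (List (String × Option String)) → Option (String × List (List (String × Option String)))
  | [] => none
  | t :: rest =>
    let c := pvClean t
    if c.1 = some "user" ∧ c.2 ≠ "" then some (c.2, rest) else pvFindUser rest

-- stage 2: first non-empty manager utterance in that suffix
def pvFindManager : List (List (String × Option String)) → Option String
  | [] => none
  | t :: rest =>
    let c := pvClean t
    if c.1 = some "manager" ∧ c.2 ≠ "" then some c.2 else pvFindManager rest

def extract_first_user_and_manager_alt (turns : List (List (String × Option String))) : Option String × Option String :=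
  match pvFindUser turns with
  | none => (none, none)
  | some (u, rest) => (some u, pvFindManager rest)

-- ===== PRECONDITION & SPEC =====
def Spec_extract_first_user_and_manager (turns : List (List (String × Option String))) (out : Option String × Option String) : Prop := out = extract_first_user_and_manager_alt turns
instance (turns : List (List (String × Option String))) (out : Option String × Option String) : Decidable (Spec_extract_first_user_and_manager turns out) := by unfold Spec_extract_first_user_and_manager; infer_instance

-- ===== CLAIM (what is proved, stated in full; the proofs are below) =====
def Claim_equal_extract_first_user_and_manager : Prop := ∀ (turns : List (List (String × Option String))), Dom_extract_first_user_and_manager turns → Spec_extract_first_user_and_manager turns (extract_first_user_and_manager turns)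

-- ===== LEMMAS AND PROOFS =====

-- once a user is found, A's loop scans the remainder exactly like pvFindManager
theorem pvALoop_seen (rest : List (List (String × Option String))) (u : String) :
    pvALoop rest (some u) none true = (some u, pvFindManager rest) := by
  induction rest with
  | nil => rfl
  | cons t rs ih =>
    simp only [pvALoop, pvFindManager, pvClean]
    set role := (pvDget t "role").getD (some "")
    set text := PySem.Str.strip (((pvDget t "text").getD none).getD "")
    by_cases ht : text = "" <;> by_cases hb : role = some "bot" <;>
      by_cases hu : role = some "user" <;> by_cases hm : role = some "manager" <;>
      simp_all

-- before any user is found, A's loop is pvFindUser followed by the seen-phase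
theorem pvALoop_unseen (turns : List (List (String × Option String))) :
    pvALoop turns none none false =
      match pvFindUser turns with
      | none => (none, none)
      | some (u, rest) => (some u, pvFindManager rest) := by
  induction turns with
  | nil => rfl
  | cons t rs ih =>
    simp only [pvALoop, pvFindUser, pvClean]
    set role := (pvDget t "role").getD (some "")
    set text := PySem.Str.strip (((pvDget t "text").getD none).getD "")
    by_cases ht : text = "" <;> by_cases hb : role = some "bot" <;>
      by_cases hu : role = some "user" <;> by_cases hm : role = some "manager" <;>
      simp_all [pvALoop_seen]

-- ===== VERDICT (by name: the statement is the Claim_ definition above) =====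
theorem extract_first_user_and_manager_spec : Claim_equal_extract_first_user_and_manager := by
  intro turns _
  show _ = _
  simp only [extract_first_user_and_manager, extract_first_user_and_manager_alt]
  exact pvALoop_unseen turns
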